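-- pv_equiv track=rewrite | github.com/congyuluo/NameGenie | formatting_helpers.py | remove_ending_braces
-- ===== SOURCE A (Python) =====
-- def remove_ending_braces(s: str, num_braces: int) -> str:
--     """
--     Removes a specific number of ending braces from a string.
--     """
--     # Find the last index of the string
--     last_index = len(s) - 1
--     # Find the index of the last brace
--     for i in range(last_index, -1, -1):
--         if s[i] == '}':
--             num_braces -= 1
--             if num_braces == 0:
--                 return s[:i]
--     return s
-- ===== SOURCE B (Python) =====
-- def remove_ending_braces(s: str, num_braces: int) -> str:
--     """
--     Removes a specific number of ending braces from a string.
--     """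
--     # One forward pass: table of all brace positions, then O(1) lookup.
--     positions = [i for i, c in enumerate(s) if c == '}']
--     if num_braces <= 0 or num_braces > len(positions):
--         return s
--     return s[:positions[-num_braces]]
-- ===== Notes on version B (the rewrite author's own statement) =====
-- stated objective: alternative
-- what changed: Replaces the backward scan-and-count with early return by a single forward pass building the table of all brace positions followed by one negative-index lookup.
import Mathlib
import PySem

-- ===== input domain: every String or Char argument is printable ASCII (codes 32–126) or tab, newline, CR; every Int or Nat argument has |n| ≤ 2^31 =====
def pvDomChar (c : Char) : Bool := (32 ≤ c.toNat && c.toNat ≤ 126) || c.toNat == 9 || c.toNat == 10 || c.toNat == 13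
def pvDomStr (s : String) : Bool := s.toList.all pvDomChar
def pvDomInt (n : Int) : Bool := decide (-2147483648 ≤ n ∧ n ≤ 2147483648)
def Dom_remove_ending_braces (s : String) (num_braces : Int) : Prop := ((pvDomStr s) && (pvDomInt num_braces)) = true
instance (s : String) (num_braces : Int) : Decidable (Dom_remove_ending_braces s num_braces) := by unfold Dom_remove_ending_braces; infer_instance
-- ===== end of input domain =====

-- B replaces A's backward scan-and-count (early return) by one forward pass building the
-- table of brace positions plus a single negative-index lookup; alternative decomposition, same cost.

-- ===== PORT A =====
-- A's for-loop over range(last_index, -1, -1) with early return, as structural recursion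
-- over the index list; s[i] is ported as pyGetD with a dummy default — every scanned index
-- is in range, so the default is never used (exact).
def removeLoopA (s : String) (is : List Int) (n : Int) : String :=
  match is with
  | [] => s
  | i :: rest =>
    if PySem.List.pyGetD s.toList i ' ' = '}' then
      if n - 1 = 0 then PySem.Str.slice s none (some i)
      else removeLoopA s rest (n - 1)
    else removeLoopA s rest n

def remove_ending_braces (s : String) (num_braces : Int) : String :=
  removeLoopA s (PySem.List.pyRange (PySem.Str.len s - 1) (-1) (-1)) num_braces

-- ===== PORT B =====
-- the comprehension [i for i, c in enumerate(s) if c == '}']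
def bracePositions (cs : List Char) (a : Int) : List Int :=
  (PySem.List.enumerate cs a).filterMap (fun p => if p.2 = '}' then some p.1 else none)

def remove_ending_braces_alt (s : String) (num_braces : Int) : String :=
  let positions := bracePositions s.toList 0
  if num_braces ≤ 0 ∨ (positions.length : Int) < num_braces then s
  else PySem.Str.slice s none (some (PySem.List.pyGetD positions (-num_braces) 0))

-- ===== PRECONDITION & SPEC =====
def Spec_remove_ending_braces (s : String) (num_braces : Int) (out : String) : Prop := out = remove_ending_braces_alt s num_braces
instance (s : String) (num_braces : Int) (out : String) : Decidable (Spec_remove_ending_braces s num_braces out) := by unfold Spec_remove_ending_braces; infer_instance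

-- ===== CLAIM (what is proved, stated in full; the proofs are below) =====
def Claim_equal_remove_ending_braces : Prop := ∀ (s : String) (num_braces : Int), Dom_remove_ending_braces s num_braces → Spec_remove_ending_braces s num_braces (remove_ending_braces s num_braces)

-- ===== LEMMAS AND PROOFS =====

theorem bracePositions_nil (a : Int) : bracePositions [] a = [] := rfl

theorem bracePositions_cons (c : Char) (cs : List Char) (a : Int) :
    bracePositions (c :: cs) a =
      (if c = '}' then [a] else []) ++ bracePositions cs (a + 1) := by
  by_cases h : c = '}' <;>
    simp [bracePositions, PySem.List.enumerate_cons, h]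

theorem bracePositions_append (xs ys : List Char) (a : Int) :
    bracePositions (xs ++ ys) a =
      bracePositions xs a ++ bracePositions ys (a + xs.length) := by
  induction xs generalizing a with
  | nil => simp [bracePositions_nil]
  | cons x xs ih =>
      simp [bracePositions_cons, ih, List.append_assoc]
      ring_nf

theorem removeLoopA_spec (s : String) (k : Nat) (hk : k ≤ s.toList.length) (n : Int) :
    removeLoopA s (PySem.List.pyRange ((k : Int) - 1) (-1) (-1)) n =
      (if 1 ≤ n ∧ n.toNat ≤ (bracePositions (s.toList.take k) 0).length then
         PySem.Str.slice s none
           (some ((bracePositions (s.toList.take k) 0).getD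
             ((bracePositions (s.toList.take k) 0).length - n.toNat) 0))
       else s) := by
  induction k generalizing n with
  | zero =>
      rw [PySem.List.pyRange_neg_one_eq_nil (by omega)]
      rw [if_neg (by simp [bracePositions_nil]; omega)]
      rfl
  | succ k ih =>
      have hklt : k < s.toList.length := by omega
      have hcons : PySem.List.pyRange ((k + 1 : Nat) - 1) (-1) (-1)
          = (k : Int) :: PySem.List.pyRange ((k : Int) - 1) (-1) (-1) := by
        push_cast
        rw [PySem.List.pyRange_neg_one_cons (by omega)]
        norm_num
      have hget : PySem.List.pyGetD s.toList (k : Int) ' ' = s.toList[k] := by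
        simp [PySem.List.pyGetD_natCast, List.getElem?_eq_getElem hklt]
      have hlen' : (s.toList.take k).length = k := by
        rw [List.length_take]; omega
      have htake : s.toList.take (k + 1) = s.toList.take k ++ [s.toList[k]] := by
        rw [List.take_add_one]
        simp [List.getElem?_eq_getElem hklt]
      rw [hcons]
      show (if PySem.List.pyGetD s.toList (k : Int) ' ' = '}' then
              if n - 1 = 0 then PySem.Str.slice s none (some (k : Int))
              else removeLoopA s (PySem.List.pyRange ((k : Int) - 1) (-1) (-1)) (n - 1)
            else removeLoopA s (PySem.List.pyRange ((k : Int) - 1) (-1) (-1)) n) = _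
      rw [hget]
      set ps := bracePositions (s.toList.take k) 0 with hps
      by_cases hc : s.toList[k] = '}'
      · have hpos : bracePositions (s.toList.take (k + 1)) 0 = ps ++ [(k : Int)] := by
          rw [htake, bracePositions_append, hlen', bracePositions_cons,
            bracePositions_nil, if_pos hc]
          norm_num [← hps]
        rw [if_pos hc, hpos]
        simp only [List.length_append, List.length_cons, List.length_nil, Nat.zero_add]
        by_cases hn1 : n - 1 = 0
        · have hn : n = 1 := by omega
          subst hn
          rw [if_pos hn1, if_pos (by constructor <;> omega)]
          congr 1
          have h1 : ps.length + 1 - (1 : Int).toNat = ps.length := by omega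
          rw [h1]
          simp [List.getD]
        · rw [if_neg hn1, ih (by omega) (n - 1)]
          by_cases hn2 : 2 ≤ n
          · have hcnd : (1 ≤ n - 1 ∧ (n - 1).toNat ≤ ps.length) ↔
                (1 ≤ n ∧ n.toNat ≤ ps.length + 1) := by omega
            by_cases hcl : 1 ≤ n - 1 ∧ (n - 1).toNat ≤ ps.length
            · rw [if_pos hcl, if_pos (hcnd.mp hcl)]
              congr 1
              have hidx : ps.length + 1 - n.toNat = ps.length - (n - 1).toNat := by omega
              rw [hidx, List.getD_append _ _ _ _ (by omega)]
            · rw [if_neg hcl, if_neg (fun h => hcl (hcnd.mpr h))]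
          · rw [if_neg (by omega), if_neg (by omega)]
      · have hpos : bracePositions (s.toList.take (k + 1)) 0 = ps := by
          rw [htake, bracePositions_append, hlen', bracePositions_cons,
            bracePositions_nil, if_neg hc]
          simp [← hps]
        rw [if_neg hc, hpos]
        exact ih (by omega) n

theorem remove_ending_braces_eq (s : String) (n : Int) :
    remove_ending_braces s n = remove_ending_braces_alt s n := by
  have halt : remove_ending_braces_alt s n =
      if n ≤ 0 ∨ ((bracePositions s.toList 0).length : Int) < n then s
      else PySem.Str.slice s none
        (some (PySem.List.pyGetD (bracePositions s.toList 0) (-n) 0)) := rfl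
  rw [remove_ending_braces, PySem.Str.len_eq,
    removeLoopA_spec s s.toList.length (le_refl _) n]
  rw [List.take_length, halt]
  set ps := bracePositions s.toList 0 with hps
  by_cases hc : 1 ≤ n ∧ n.toNat ≤ ps.length
  · rw [if_pos hc]
    have hneg : ¬ (n ≤ 0 ∨ (ps.length : Int) < n) := by omega
    rw [if_neg hneg]
    congr 2
    have hn : -n = -((n.toNat : Nat) : Int) := by omega
    rw [hn, PySem.List.pyGetD_neg_natCast ps n.toNat 0 (by omega) hc.2,
      List.getD_eq_getElem _ _ (by omega)]
  · rw [if_neg hc]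
    rw [if_pos (by omega)]

-- ===== VERDICT (by name: the statement is the Claim_ definition above) =====
theorem remove_ending_braces_spec : Claim_equal_remove_ending_braces := by
  intro s n _
  unfold Spec_remove_ending_braces
  exact remove_ending_braces_eq s n
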